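-- pv_equiv track=rewrite | github.com/AdamZhouSE/pythonHomework | Code/CodeRecords/2489/60675/283576.py | func
-- ===== SOURCE A (Python) =====
-- import bisect
--
-- def func(nums:list,lower:int,upper:int) -> int:
--     p = [0]
--     for i in nums:
--         p += [p[-1] + i]
--     ans = 0
--     q = []
--     for pi in p[:]:
--         i, j = pi + lower, pi + upper
--         l = bisect.bisect_left(q, i)
--         r = bisect.bisect_right(q, j)
--         ans += r - l
--         bisect.insort(q, pi)
--     return ans
-- ===== SOURCE B (Python) =====
-- import bisect
--
-- def func(nums: list, lower: int, upper: int) -> int: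
--     p = [0]
--     s = 0
--     for x in nums:
--         s += x
--         p.append(s)
--
--     def solve(a):
--         # returns (count over pairs j<i inside a, a sorted)
--         n = len(a)
--         if n <= 1:
--             return 0, a
--         c1, left = solve(a[:n // 2])
--         c2, right = solve(a[n // 2:])
--         c = c1 + c2
--         for x in right:
--             c += bisect.bisect_right(left, x + upper) - bisect.bisect_left(left, x + lower)
--         return c, sorted(left + right)
--
--     return solve(p)[0]
-- ===== Notes on version B (the rewrite author's own statement) =====
-- stated objective: faster
-- what changed: B drops A's incrementally insort-maintained sorted list with per-element binary searches and replaces it by divide-and-conquer merge counting: prefix sums are built with a running sum, each half is solved recursively, cross pairs are counted with bisect against the sorted left half, and the halves are re-sorted together.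
import Mathlib
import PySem

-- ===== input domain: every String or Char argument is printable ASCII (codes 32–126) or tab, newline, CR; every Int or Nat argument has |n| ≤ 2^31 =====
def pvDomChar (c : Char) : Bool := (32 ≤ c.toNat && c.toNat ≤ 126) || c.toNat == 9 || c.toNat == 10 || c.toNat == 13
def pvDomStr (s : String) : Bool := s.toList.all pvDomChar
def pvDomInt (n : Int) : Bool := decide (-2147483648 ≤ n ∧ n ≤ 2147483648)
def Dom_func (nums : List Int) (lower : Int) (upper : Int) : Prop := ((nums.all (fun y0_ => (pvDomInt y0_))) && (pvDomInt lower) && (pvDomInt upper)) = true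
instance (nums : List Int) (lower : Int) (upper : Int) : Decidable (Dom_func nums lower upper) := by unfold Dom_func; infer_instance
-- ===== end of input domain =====

-- B replaces A's incrementally insort-maintained sorted list (quadratic shifting) by
-- divide-and-conquer merge counting over the prefix sums (objective: alternative/faster algorithm).


-- ===== PORT A =====
-- p = [0]; for i in nums: p += [p[-1] + i]   (p is never empty, so p[-1] is pyGet? ... with an unreachable default)
def pvAbuild (nums : List Int) : List Int :=
  nums.foldl (fun p i => p ++ [(PySem.List.pyGet? p (-1)).getD 0 + i]) [0]

def func (nums : List Int) (lower : Int) (upper : Int) : Int :=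
  let p := pvAbuild nums
  let r := p.foldl (fun (s : Int × List Int) pi =>
      let l := PySem.List.bisectLeft s.2 (pi + lower)
      let r := PySem.List.bisectRight s.2 (pi + upper)
      (s.1 + ((r : Int) - (l : Int)),
       PySem.List.insertBy (fun a b => decide (a < b)) pi s.2)) (0, [])
  r.1

-- ===== PORT B =====
-- p = [0]; s = 0; for x in nums: s += x; p.append(s)
def pvBbuild (nums : List Int) : List Int × Int :=
  nums.foldl (fun (ps : List Int × Int) x =>
      let s := ps.2 + x
      (ps.1 ++ [s], s)) ([0], 0)

-- def solve(a): divide-and-conquer merge count; a[:n//2] / a[n//2:] are take/drop (n//2 ≥ 0, so exact)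
def pvSolve (lower upper : Int) (a : List Int) : Int × List Int :=
  if _h : a.length ≤ 1 then (0, a)
  else
    let n := a.length
    let lft := pvSolve lower upper (a.take (n / 2))
    let rgt := pvSolve lower upper (a.drop (n / 2))
    let c := rgt.2.foldl (fun c x =>
        c + ((PySem.List.bisectRight lft.2 (x + upper) : Int)
              - (PySem.List.bisectLeft lft.2 (x + lower) : Int))) (lft.1 + rgt.1)
    (c, PySem.List.sorted (lft.2 ++ rgt.2) (fun y => y) false)
termination_by a.length
decreasing_by
  · simp [List.length_take]; omega
  · simp [List.length_drop]; omega

def func_alt (nums : List Int) (lower : Int) (upper : Int) : Int :=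
  let p := (pvBbuild nums).1
  (pvSolve lower upper p).1

-- ===== PRECONDITION & SPEC =====
def Spec_func (nums : List Int) (lower : Int) (upper : Int) (out : Int) : Prop := out = func_alt nums lower upper
instance (nums : List Int) (lower : Int) (upper : Int) (out : Int) : Decidable (Spec_func nums lower upper out) := by unfold Spec_func; infer_instance

-- ===== CLAIM (what is proved, stated in full; the proofs are below) =====
def Claim_equal_func : Prop := ∀ (nums : List Int) (lower : Int) (upper : Int), Dom_func nums lower upper → Spec_func nums lower upper (func nums lower upper)

-- ===== LEMMAS AND PROOFS =====

-- number of y in q with y < t / y ≤ t, as an Int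
def pvCntLt (q : List Int) (t : Int) : Int := (q.countP (fun y => decide (y < t)) : Int)
def pvCntLe (q : List Int) (t : Int) : Int := (q.countP (fun y => decide (y ≤ t)) : Int)

-- contribution of one prefix value x against the multiset pref
def pvG (lower upper : Int) (pref : List Int) (x : Int) : Int :=
  pvCntLe pref (x + upper) - pvCntLt pref (x + lower)

-- the common value: sum of contributions over the prefix list p
def pvPairSum (lower upper : Int) (p : List Int) : Int :=
  ((List.range p.length).map (fun i => pvG lower upper (p.take i) (p.getD i 0))).sum

theorem pvBisectLeft_count (q : List Int) (x : Int) (h : q.Pairwise (· ≤ ·)) :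
    (PySem.List.bisectLeft q x : Int) = pvCntLt q x := by
  obtain ⟨hle, hlt, hge⟩ := PySem.List.bisectLeft_spec q x h
  set l := PySem.List.bisectLeft q x with hl
  have key : q.countP (fun y => decide (y < x)) = l := by
    have := List.take_append_drop l q
    rw [← this, List.countP_append]
    have h1 : (q.take l).countP (fun y => decide (y < x)) = (q.take l).length := by
      rw [List.countP_eq_length]
      intro a ha
      obtain ⟨j, hj, rfl⟩ := List.mem_iff_getElem.mp ha
      have hj' : j < q.length := lt_of_lt_of_le (lt_of_lt_of_le hj (by simp [List.length_take])) le_rfl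
      rw [List.getElem_take]
      have : j < l := lt_of_lt_of_le hj (by simp [List.length_take])
      simpa using hlt j hj' this
    have h2 : (q.drop l).countP (fun y => decide (y < x)) = 0 := by
      rw [List.countP_eq_zero]
      intro a ha
      obtain ⟨j, hj, rfl⟩ := List.mem_iff_getElem.mp ha
      rw [List.getElem_drop]
      have hlen : j < q.length - l := by simpa [List.length_drop] using hj
      have hj' : l + j < q.length := by omega
      have := hge (l + j) hj' (Nat.le_add_right l j)
      simp; omega
    rw [h1, h2, List.length_take]
    omega
  simp [pvCntLt, key]

theorem pvBisectRight_count (q : List Int) (x : Int) (h : q.Pairwise (· ≤ ·)) :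
    (PySem.List.bisectRight q x : Int) = pvCntLe q x := by
  obtain ⟨hle, hlt, hge⟩ := PySem.List.bisectRight_spec q x h
  set l := PySem.List.bisectRight q x with hl
  have key : q.countP (fun y => decide (y ≤ x)) = l := by
    have := List.take_append_drop l q
    rw [← this, List.countP_append]
    have h1 : (q.take l).countP (fun y => decide (y ≤ x)) = (q.take l).length := by
      rw [List.countP_eq_length]
      intro a ha
      obtain ⟨j, hj, rfl⟩ := List.mem_iff_getElem.mp ha
      have hj' : j < q.length := lt_of_lt_of_le (lt_of_lt_of_le hj (by simp [List.length_take])) le_rfl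
      rw [List.getElem_take]
      have : j < l := lt_of_lt_of_le hj (by simp [List.length_take])
      simpa using hlt j hj' this
    have h2 : (q.drop l).countP (fun y => decide (y ≤ x)) = 0 := by
      rw [List.countP_eq_zero]
      intro a ha
      obtain ⟨j, hj, rfl⟩ := List.mem_iff_getElem.mp ha
      rw [List.getElem_drop]
      have hlen : j < q.length - l := by simpa [List.length_drop] using hj
      have hj' : l + j < q.length := by omega
      have := hge (l + j) hj' (Nat.le_add_right l j)
      simp; omega
    rw [h1, h2, List.length_take]
    omega
  simp [pvCntLe, key]

theorem pvAloop (lower upper : Int) (rest : List Int) : ∀ (ans : Int) (pref : List Int),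
    (rest.foldl (fun (s : Int × List Int) pi =>
      let l := PySem.List.bisectLeft s.2 (pi + lower)
      let r := PySem.List.bisectRight s.2 (pi + upper)
      (s.1 + ((r : Int) - (l : Int)),
       PySem.List.insertBy (fun a b => decide (a < b)) pi s.2))
      (ans, PySem.List.sorted pref (fun x => x) false)).1
    = ans + ((List.range rest.length).map
        (fun i => pvG lower upper (pref ++ rest.take i) (rest.getD i 0))).sum := by
  induction rest with
  | nil => intro ans pref; simp
  | cons x rest ih =>
    intro ans pref
    have hins : PySem.List.insertBy (fun a b => decide (a < b)) x
        (PySem.List.sorted pref (fun y => y) false)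
        = PySem.List.sorted (pref ++ [x]) (fun y => y) false := by
      rw [PySem.List.sorted_eq_foldl_insertBy, PySem.List.sorted_eq_foldl_insertBy,
        List.foldl_append]
      simp
    have hperm : (PySem.List.sorted pref (fun y => y) false).Perm pref :=
      PySem.List.sorted_perm pref (fun y => y) false
    have hpw : (PySem.List.sorted pref (fun y => y) false).Pairwise (· ≤ ·) := by
      simpa using PySem.List.sorted_pairwise pref (fun y => y)
    have hr := pvBisectRight_count (PySem.List.sorted pref (fun y => y) false) (x + upper) hpw
    have hl := pvBisectLeft_count (PySem.List.sorted pref (fun y => y) false) (x + lower) hpw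
    have hcntLe : pvCntLe (PySem.List.sorted pref (fun y => y) false) (x + upper) = pvCntLe pref (x + upper) := by
      simp [pvCntLe, hperm.countP_eq]
    have hcntLt : pvCntLt (PySem.List.sorted pref (fun y => y) false) (x + lower) = pvCntLt pref (x + lower) := by
      simp [pvCntLt, hperm.countP_eq]
    simp only [List.foldl_cons, hins]
    rw [ih]
    rw [hr, hl, hcntLe, hcntLt]
    rw [List.length_cons, List.range_succ_eq_map]
    simp only [List.map_cons, List.map_map, List.sum_cons]
    have hterms : ∀ i : Nat,
        pvG lower upper (pref ++ (x :: rest).take (Nat.succ i)) ((x :: rest).getD (Nat.succ i) 0)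
        = pvG lower upper ((pref ++ [x]) ++ rest.take i) (rest.getD i 0) := by
      intro i; simp [List.take_succ_cons, List.append_assoc]
    simp only [Function.comp_def]
    simp only [hterms]
    simp only [List.take_zero, List.append_nil, List.getD_cons_zero]
    simp only [pvG]
    ring

theorem pvGetNegOne (p : List Int) (h : p ≠ []) :
    PySem.List.pyGet? p (-1) = p.getLast? := by
  have hlen : 1 ≤ p.length := List.length_pos_iff.mpr h
  simp [PySem.List.pyGet?, PySem.List.pyIdx?, hlen, List.getLast?_eq_getElem?]

theorem pvBuildAux (nums : List Int) : ∀ (p : List Int) (s : Int), p ≠ [] → p.getLast? = some s →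
    nums.foldl (fun p i => p ++ [(PySem.List.pyGet? p (-1)).getD 0 + i]) p
    = (nums.foldl (fun (ps : List Int × Int) x =>
        let s := ps.2 + x
        (ps.1 ++ [s], s)) (p, s)).1 := by
  induction nums with
  | nil => intro p s _ _; simp
  | cons x nums ih =>
    intro p s hne hlast
    simp only [List.foldl_cons]
    rw [pvGetNegOne p hne, hlast]
    exact ih (p ++ [s + x]) (s + x) (by simp) (by simp)

theorem pvBuildEq (nums : List Int) : pvAbuild nums = (pvBbuild nums).1 := by
  exact pvBuildAux nums [0] 0 (by simp) (by simp)

theorem pvA_eq (nums : List Int) (lower upper : Int) :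
    func nums lower upper = pvPairSum lower upper (pvAbuild nums) := by
  have h0 : ([] : List Int) = PySem.List.sorted ([] : List Int) (fun y => y) false := by
    simp [PySem.List.sorted_eq_foldl_insertBy]
  unfold func
  rw [h0, pvAloop]
  simp [pvPairSum]

theorem pvG_append (lower upper : Int) (L T : List Int) (x : Int) :
    pvG lower upper (L ++ T) x = pvG lower upper L x + pvG lower upper T x := by
  simp [pvG, pvCntLe, pvCntLt, List.countP_append]
  ring

theorem pvRangeGetD (R : List Int) :
    (List.range R.length).map (fun i => R.getD i 0) = R := by
  apply List.ext_getElem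
  · simp
  · intro j h1 h2
    simp only [List.getElem_map, List.getElem_range]
    exact List.getD_eq_getElem R 0 h2

theorem pvPairSum_append (lower upper : Int) (L R : List Int) :
    pvPairSum lower upper (L ++ R)
      = pvPairSum lower upper L + pvPairSum lower upper R
        + (R.map (fun x => pvG lower upper L x)).sum := by
  unfold pvPairSum
  rw [List.length_append, List.range_add, List.map_append, List.sum_append, List.map_map]
  have h1 : (List.range L.length).map (fun i => pvG lower upper ((L ++ R).take i) ((L ++ R).getD i 0))
      = (List.range L.length).map (fun i => pvG lower upper (L.take i) (L.getD i 0)) := by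
    apply List.map_congr_left
    intro i hi
    have hi' : i < L.length := List.mem_range.mp hi
    rw [List.take_append_of_le_length (le_of_lt hi')]
    rw [List.getD_eq_getElem _ 0 (by simp; omega), List.getD_eq_getElem _ 0 hi',
      List.getElem_append_left hi']
  have h2 : (List.range R.length).map ((fun i => pvG lower upper ((L ++ R).take i) ((L ++ R).getD i 0)) ∘ (fun x => L.length + x))
      = (List.range R.length).map (fun i => pvG lower upper L (R.getD i 0) + pvG lower upper (R.take i) (R.getD i 0)) := by
    apply List.map_congr_left
    intro i hi
    have hi' : i < R.length := List.mem_range.mp hi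
    simp only [Function.comp]
    have ht : (L ++ R).take (L.length + i) = L ++ R.take i := by
      rw [List.take_append]
      simp
    have hg : (L ++ R).getD (L.length + i) 0 = R.getD i 0 := by
      rw [List.getD_eq_getElem _ 0 (by simp; omega), List.getD_eq_getElem _ 0 hi',
        List.getElem_append_right (Nat.le_add_right _ _)]
      simp
    rw [ht, hg, pvG_append]
  rw [h1, h2, PySem.List.sum_map_add_int]
  have h3 : (List.range R.length).map (fun i => pvG lower upper L (R.getD i 0))
      = R.map (fun x => pvG lower upper L x) := by
    conv_rhs => rw [← pvRangeGetD R]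
    rw [List.map_map]
    rfl
  rw [h3]
  ring

theorem pvPairSum_short (lower upper : Int) (a : List Int) (h : a.length ≤ 1) :
    pvPairSum lower upper a = 0 := by
  match a with
  | [] => simp [pvPairSum]
  | [x] => simp [pvPairSum, pvG, pvCntLe, pvCntLt]
  | x :: y :: t => simp at h

theorem pvSolve_spec (lower upper : Int) (a : List Int) :
    (pvSolve lower upper a).2.Perm a ∧ (pvSolve lower upper a).2.Pairwise (· ≤ ·) ∧
    (pvSolve lower upper a).1 = pvPairSum lower upper a := by
  by_cases h : a.length ≤ 1
  · rw [pvSolve]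
    simp only [h, dif_pos]
    refine ⟨List.Perm.refl a, ?_, (pvPairSum_short lower upper a h).symm⟩
    match a with
    | [] => exact List.Pairwise.nil
    | [x] => simp
    | x :: y :: t => simp at h
  · have hta : (a.take (a.length / 2)).length < a.length := by simp [List.length_take]; omega
    have hda : (a.drop (a.length / 2)).length < a.length := by simp [List.length_drop]; omega
    obtain ⟨ihLp, ihLs, ihLc⟩ := pvSolve_spec lower upper (a.take (a.length / 2))
    obtain ⟨ihRp, ihRs, ihRc⟩ := pvSolve_spec lower upper (a.drop (a.length / 2))
    rw [pvSolve]
    simp only [h, dif_neg, not_false_iff]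
    set L0 := a.take (a.length / 2) with hL0
    set R0 := a.drop (a.length / 2) with hR0
    set lft := pvSolve lower upper L0 with hlft
    set rgt := pvSolve lower upper R0 with hrgt
    have happ : L0 ++ R0 = a := List.take_append_drop _ a
    have hperm2 : (lft.2 ++ rgt.2).Perm a := by
      calc (lft.2 ++ rgt.2).Perm (L0 ++ R0) := List.Perm.append ihLp ihRp
        _ = a := happ
    constructor
    · exact (PySem.List.sorted_perm _ _ _).trans hperm2
    constructor
    · simpa using PySem.List.sorted_pairwise (lft.2 ++ rgt.2) (fun y => y)
    · -- the count
      have hcross : ∀ x : Int,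
          ((PySem.List.bisectRight lft.2 (x + upper) : Int)
            - (PySem.List.bisectLeft lft.2 (x + lower) : Int)) = pvG lower upper L0 x := by
        intro x
        rw [pvBisectRight_count _ _ ihLs, pvBisectLeft_count _ _ ihLs]
        simp [pvG, pvCntLe, pvCntLt, ihLp.countP_eq]
      rw [PySem.List.foldl_add]
      have hmap : (rgt.2.map (fun x =>
          (PySem.List.bisectRight lft.2 (x + upper) : Int)
            - (PySem.List.bisectLeft lft.2 (x + lower) : Int))).sum
          = (R0.map (fun x => pvG lower upper L0 x)).sum := by
        have := (ihRp.map (fun x => pvG lower upper L0 x)).sum_eq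
        rw [← this]
        congr 1
        apply List.map_congr_left
        intro x _
        exact hcross x
      rw [hmap, ihLc, ihRc, ← happ, pvPairSum_append]
termination_by a.length

theorem pvB_eq (nums : List Int) (lower upper : Int) :
    func_alt nums lower upper = pvPairSum lower upper ((pvBbuild nums).1) := by
  unfold func_alt
  exact (pvSolve_spec lower upper _).2.2

-- ===== VERDICT (by name: the statement is the Claim_ definition above) =====
theorem func_spec : Claim_equal_func := by
  intro nums lower upper _
  unfold Spec_func
  rw [pvA_eq, pvB_eq, pvBuildEq]
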